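-- pv_equiv track=rewrite | github.com/apsampaio/PlayingWithPython | Automate The Boring Stuff/Chapter 4 - Lists/CoinFlipStreaks.py | find_streaks
-- ===== SOURCE A (Python) =====
-- def find_streaks(list):
--     count = 0
--     countStreak = 0
--     for x in range(len(list)):
--         try:
--             if list[x] == list[x + 1]:
--                 count += 1
--             else:
--                 count = 0
--             if count == 5:  # If 5 we got a 6 streak
--                 count = 0
--                 countStreak += 1
--         except IndexError:
--             return countStreak
-- ===== SOURCE B (Python) =====
-- def find_streaks(list):
--     # Run-length decomposition: a maximal run of n equal flips contains
--     # (n - 1) // 6... no: A counts a streak every 6th consecutive equal flip,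
--     # i.e. (n - 1) // 5 streaks per run of length n.
--     if not list:
--         return None
--     runs = []
--     cur = list[0]
--     n = 0
--     for x in list:
--         if x == cur:
--             n += 1
--         else:
--             runs.append(n)
--             cur = x
--             n = 1
--     runs.append(n)
--     return sum((n - 1) // 5 for n in runs)
-- ===== Notes on version B (the rewrite author's own statement) =====
-- stated objective: alternative
-- what changed: Replaces A's reach-5-then-reset pairwise counter (with the try/except IndexError exit) by run-length grouping: one pass collects the lengths of maximal runs of equal flips, then the answer is the closed form sum((n-1)//5) over run lengths.
-- outside the precondition, e.g. on find_streaks([]): A returns None, B returns None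
import Mathlib
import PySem

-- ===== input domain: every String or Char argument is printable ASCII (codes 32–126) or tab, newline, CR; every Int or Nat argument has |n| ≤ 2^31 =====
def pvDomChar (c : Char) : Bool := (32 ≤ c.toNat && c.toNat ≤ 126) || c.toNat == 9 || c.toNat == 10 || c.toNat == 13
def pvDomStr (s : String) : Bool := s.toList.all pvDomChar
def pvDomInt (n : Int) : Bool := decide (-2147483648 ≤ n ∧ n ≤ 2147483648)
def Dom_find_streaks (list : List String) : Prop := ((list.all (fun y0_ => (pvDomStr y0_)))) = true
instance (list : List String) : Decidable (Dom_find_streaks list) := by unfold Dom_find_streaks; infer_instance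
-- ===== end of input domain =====

-- B replaces A's reach-5-then-reset counter by run-length grouping plus the closed form
-- sum((n-1)//5) over run lengths; return-value equivalence is proved on non-empty lists.

-- ===== PORT A =====
-- for x in range(len(list)) with try/except IndexError: out-of-range indexing returns countStreak
def find_streaks_go (list : List String) (x : Nat) (count countStreak : Int) : Int :=
  if _h : x < list.length then
    match PySem.List.pyGet? list ((x : Int)), PySem.List.pyGet? list ((x : Int) + 1) with
    | some a, some b =>
      let count := if a = b then count + 1 else 0
      let p := if count = 5 then ((0 : Int), countStreak + 1) else (count, countStreak)
      find_streaks_go list (x + 1) p.1 p.2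
    | _, _ => countStreak                -- IndexError: return countStreak
  else countStreak                       -- loop ends (Python returns None; outside Pre_)
termination_by list.length - x

def find_streaks (list : List String) : Int :=
  find_streaks_go list 0 0 0

-- ===== PORT B =====
-- loop state: (runs, cur, n)
def find_streaks_alt_step (st : List Int × String × Int) (x : String) : List Int × String × Int :=
  if x = st.2.1 then (st.1, st.2.1, st.2.2 + 1) else (st.1 ++ [st.2.2], x, 1)

def find_streaks_alt (list : List String) : Int :=
  match list with
  | [] => 0      -- Python B returns None here; outside Pre_
  | a :: _ =>
    let st := list.foldl find_streaks_alt_step ([], a, 0)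
    ((st.1 ++ [st.2.2]).map (fun n => PySem.Int.floordiv (n - 1) 5)).sum

-- ===== PRECONDITION & SPEC =====
-- Pre_ excludes only the empty list, on which both Pythons return None (no Int value to compare).
def Pre_find_streaks (list : List String) : Prop := list ≠ []
instance (list : List String) : Decidable (Pre_find_streaks list) := by unfold Pre_find_streaks; infer_instance
def pvWitness_find_streaks : List String := ["H", "H", "T"]
def Spec_find_streaks (list : List String) (out : Int) : Prop := out = find_streaks_alt list
instance (list : List String) (out : Int) : Decidable (Spec_find_streaks list out) := by unfold Spec_find_streaks; infer_instance

-- ===== CLAIM (what is proved, stated in full; the proofs are below) =====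
def Claim_equal_find_streaks : Prop := ∀ (list : List String), Dom_find_streaks list → Pre_find_streaks list → Spec_find_streaks list (find_streaks list)

-- ===== LEMMAS AND PROOFS =====

-- A's loop as structural recursion over the suffix of the list
def fA : List String → Int → Int → Int
  | [], _, s => s
  | [_], _, s => s
  | a :: b :: rest, c, s =>
    let c := if a = b then c + 1 else 0
    if c = 5 then fA (b :: rest) 0 (s + 1) else fA (b :: rest) c s

-- B's loop, accumulator-free: total streak count of the remaining list given current run (cur, n)
def goB : List String → String → Int → Int
  | [], _, n => (n - 1) / 5
  | b :: rest, cur, n =>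
    if b = cur then goB rest cur (n + 1) else (n - 1) / 5 + goB rest b 1

theorem find_streaks_go_eq_fA (list : List String) (x : Nat) (c s : Int)
    (hx : x ≤ list.length) : find_streaks_go list x c s = fA (list.drop x) c s := by
  induction hn : list.length - x generalizing x c s with
  | zero =>
    have hx' : x = list.length := by omega
    rw [find_streaks_go]
    simp [hx', fA]
  | succ k ih =>
    have hx1 : x < list.length := by omega
    rw [find_streaks_go, dif_pos hx1]
    have hg1 : PySem.List.pyGet? list ((x : Int)) = some list[x] := by
      rw [PySem.List.pyGet?_natCast]; exact List.getElem?_eq_getElem hx1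
    have hcast : ((x : Int) + 1) = ((x + 1 : Nat) : Int) := by push_cast; ring
    rcases Nat.lt_or_ge (x + 1) list.length with h2 | h2
    · have hg2 : PySem.List.pyGet? list ((x : Int) + 1) = some list[x+1] := by
        rw [hcast, PySem.List.pyGet?_natCast]; exact List.getElem?_eq_getElem h2
      have hd : list.drop x = list[x] :: list[x+1] :: list.drop (x + 2) := by
        rw [List.drop_eq_getElem_cons (by omega), List.drop_eq_getElem_cons (by omega)]
      have hd2 : list.drop (x + 1) = list[x+1] :: list.drop (x + 2) := by
        rw [List.drop_eq_getElem_cons (by omega)]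
      simp only [hg1, hg2]
      rw [ih (x + 1) _ _ (by omega) (by omega), hd2, hd, fA]
      by_cases hab : list[x] = list[x+1]
      · by_cases h5 : c + 1 = 5 <;> simp [hab, h5]
      · simp [hab]
    · -- x + 1 = list.length : IndexError branch
      have hg2 : PySem.List.pyGet? list ((x : Int) + 1) = none := by
        rw [hcast, PySem.List.pyGet?_natCast]
        exact List.getElem?_eq_none_iff.mpr (by omega)
      have hd : list.drop x = [list[x]] := by
        rw [List.drop_eq_getElem_cons (by omega)]
        simp [List.drop_eq_nil_of_le (by omega : list.length ≤ x + 1)]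
      simp only [hg1, hg2, hd, fA]

-- A's pair loop computes the run-length closed form: invariant c = (n-1) % 5, with the
-- already-banked streaks of the current run, (n-1)/5, subtracted out.
theorem fA_eq_goB (t : List String) (prev : String) (n s : Int) (hn : 1 ≤ n) :
    fA (prev :: t) ((n - 1) % 5) s = s + goB t prev n - (n - 1) / 5 := by
  induction t generalizing prev n s with
  | nil => rw [fA, goB]; ring
  | cons b rest ih =>
    rw [fA, goB]
    by_cases hb : prev = b
    · subst hb
      simp only [ite_true]
      by_cases h5 : (n - 1) % 5 + 1 = 5
      · rw [if_pos h5]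
        have hih := ih prev (n + 1) (s + 1) (by omega)
        have e1 : (n + 1 - 1) % 5 = 0 := by omega
        have e2 : (n + 1 - 1) / 5 = (n - 1) / 5 + 1 := by omega
        rw [e1, e2] at hih
        rw [hih]; ring
      · rw [if_neg h5]
        have hih := ih prev (n + 1) s (by omega)
        have e1 : (n + 1 - 1) % 5 = (n - 1) % 5 + 1 := by omega
        have e2 : (n + 1 - 1) / 5 = (n - 1) / 5 := by omega
        rw [e1, e2] at hih
        rw [hih]
    · have hb' : b ≠ prev := fun h => hb h.symm
      simp only [hb, hb', ite_false]
      have h05 : ¬ ((0 : Int) = 5) := by norm_num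
      rw [if_neg h05]
      have hih := ih b 1 s (by omega)
      have e1 : ((1 : Int) - 1) % 5 = 0 := by norm_num
      have e2 : ((1 : Int) - 1) / 5 = 0 := by norm_num
      rw [e1, e2] at hih
      rw [hih]; ring

-- B's foldl, unfolded to the accumulator-free goB
theorem foldl_step_eq_goB (t : List String) (runs : List Int) (cur : String) (n : Int) :
    (let st := t.foldl find_streaks_alt_step (runs, cur, n)
     ((st.1 ++ [st.2.2]).map (fun m => PySem.Int.floordiv (m - 1) 5)).sum)
    = (runs.map (fun m => PySem.Int.floordiv (m - 1) 5)).sum + goB t cur n := by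
  induction t generalizing runs cur n with
  | nil => simp [goB]
  | cons b rest ih =>
    simp only [List.foldl_cons, find_streaks_alt_step, goB]
    by_cases hb : b = cur
    · simp only [hb, ite_true]
      exact ih runs cur (n + 1)
    · simp only [hb, ite_false]
      rw [ih (runs ++ [n]) b 1]
      simp
      ring

-- ===== VERDICT (by name: the statement is the Claim_ definition above) =====
theorem find_streaks_spec : Claim_equal_find_streaks := by
  intro list _ hpre
  unfold Spec_find_streaks
  match list, hpre with
  | a :: t, _ =>
    show find_streaks (a :: t) = find_streaks_alt (a :: t)
    rw [find_streaks, find_streaks_go_eq_fA (a :: t) 0 0 0 (by simp)]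
    rw [find_streaks_alt]
    simp only [List.drop_zero, List.foldl_cons]
    have hstep : find_streaks_alt_step ([], a, 0) a = ([], a, 1) := by
      simp [find_streaks_alt_step]
    rw [hstep, foldl_step_eq_goB t [] a 1]
    have hA := fA_eq_goB t a 1 0 (by norm_num)
    have e1 : ((1 : Int) - 1) % 5 = 0 := by norm_num
    have e2 : ((1 : Int) - 1) / 5 = 0 := by norm_num
    rw [e1, e2] at hA
    rw [hA]
    simp
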